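-- pv_equiv track=rewrite | github.com/MDDAIEXPOSER/algoritmics | algo_5.py | control_block_part
-- ===== SOURCE A (Python) =====
-- def control_block_part(target): #инициализируем функцию с аргументом - строкой из скобочек
--     clear_result = [] #готовим пустой список
--     stack_counter = 0 #счётчик
--     for j in target: #запускаем цикл в строке
--         if j == ')': #проверка существования первой скобы в строки (открытой)
--             stack_counter -= 1 #двигаем виртуальную каретку далее, чтобы проверить другие символы в строке
--         if stack_counter > 0: #проверка счётчика, если в листе уже есть скоба - закидываем ещё
--             clear_result.append(j) #закидываем
--         if j == '(': #проверка скоб в строке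
--             stack_counter += 1 #получаем 1
--     return "".join(clear_result) #переводим из листа в строку результат
--     """Программа работает до тех пор, пока в полученной строке есть скобы"""
-- ===== SOURCE B (Python) =====
-- def control_block_part(target):
--     # pass 1: prefix bracket depth just before each character
--     pre = []
--     depth = 0
--     for c in target:
--         pre.append(depth)
--         depth += (c == '(') - (c == ')')
--     # pass 2: keep c at i iff its effective depth (after a ')' decrement) is positive
--     return "".join(c for c, d in zip(target, pre) if d - (c == ')') > 0)
-- ===== Notes on version B (the rewrite author's own statement) =====
-- stated objective: alternative
-- what changed: Replaces the single stateful scan that appends under a mutable counter with a prefix-depth table built in one pass and a pure filter over (char, depth) pairs in a second pass.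
import Mathlib
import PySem

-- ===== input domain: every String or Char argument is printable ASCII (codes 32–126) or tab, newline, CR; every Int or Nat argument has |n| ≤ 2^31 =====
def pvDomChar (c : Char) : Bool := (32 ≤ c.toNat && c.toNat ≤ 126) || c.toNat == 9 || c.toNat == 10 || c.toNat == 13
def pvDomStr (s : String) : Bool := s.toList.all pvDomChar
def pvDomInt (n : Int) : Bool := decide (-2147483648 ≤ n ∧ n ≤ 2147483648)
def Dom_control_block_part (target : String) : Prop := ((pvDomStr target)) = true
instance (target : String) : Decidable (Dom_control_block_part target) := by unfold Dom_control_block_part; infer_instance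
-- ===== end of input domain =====

-- B replaces A's single stateful scan by a prefix-depth table plus a pure filter (alternative decomposition, same cost).

-- ===== PORT A =====
-- A: one scan keeping (clear_result, stack_counter); ')' decrements before the
-- membership test, '(' increments after it.
def control_block_part (target : String) : String :=
  let st := target.toList.foldl
    (fun (st : List Char × Int) j =>
      let sc := if j = ')' then st.2 - 1 else st.2
      let cr := if sc > 0 then st.1 ++ [j] else st.1
      let sc := if j = '(' then sc + 1 else sc
      (cr, sc)) ([], 0)
  String.mk st.1

-- ===== PORT B =====
-- B pass 1: prefix depths before each character (list built by appending, as in Source B).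
def control_block_part_alt (target : String) : String :=
  let p := target.toList.foldl
    (fun (st : List Int × Int) c =>
      (st.1 ++ [st.2],
       st.2 + ((if c = '(' then 1 else 0) - (if c = ')' then 1 else 0)))) ([], 0)
  String.mk (((target.toList.zip p.1).filter
    (fun cd => cd.2 - (if cd.1 = ')' then (1 : Int) else 0) > 0)).map Prod.fst)

-- ===== PRECONDITION & SPEC =====
def Spec_control_block_part (target : String) (out : String) : Prop := out = control_block_part_alt target
instance (target : String) (out : String) : Decidable (Spec_control_block_part target out) := by unfold Spec_control_block_part; infer_instance

-- ===== CLAIM (what is proved, stated in full; the proofs are below) =====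
def Claim_equal_control_block_part : Prop := ∀ (target : String), Dom_control_block_part target → Spec_control_block_part target (control_block_part target)

-- ===== LEMMAS AND PROOFS =====

-- common recursive specification: the kept characters of l when the depth before l is d
def cbpSpec : List Char → Int → List Char
  | [], _ => []
  | c :: t, d =>
    let d' := d - (if c = ')' then 1 else 0)
    (if d' > 0 then [c] else []) ++ cbpSpec t (d' + (if c = '(' then 1 else 0))

-- prefix-depth list starting at d
def cbpPre : List Char → Int → List Int
  | [], _ => []
  | c :: t, d => d :: cbpPre t (d + ((if c = '(' then 1 else 0) - (if c = ')' then 1 else 0)))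

lemma cbp_fold_a (l : List Char) : ∀ (acc : List Char) (d : Int),
    (l.foldl (fun (st : List Char × Int) j =>
      let sc := if j = ')' then st.2 - 1 else st.2
      let cr := if sc > 0 then st.1 ++ [j] else st.1
      let sc := if j = '(' then sc + 1 else sc
      (cr, sc)) (acc, d)).1 = acc ++ cbpSpec l d := by
  induction l with
  | nil => intro acc d; simp [cbpSpec]
  | cons c t ih =>
    intro acc d
    simp only [List.foldl_cons, cbpSpec]
    by_cases hc : c = ')' <;> by_cases ho : c = '(' <;>
      simp_all <;> split_ifs <;> simp [ih]

lemma cbp_fold_b (l : List Char) : ∀ (acc : List Int) (d : Int),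
    (l.foldl (fun (st : List Int × Int) c =>
      (st.1 ++ [st.2],
       st.2 + ((if c = '(' then 1 else 0) - (if c = ')' then 1 else 0)))) (acc, d)).1
    = acc ++ cbpPre l d := by
  induction l with
  | nil => intro acc d; simp [cbpPre]
  | cons c t ih => intro acc d; simp [cbpPre, ih]

lemma cbp_filter (l : List Char) : ∀ (d : Int),
    ((l.zip (cbpPre l d)).filter
      (fun cd => cd.2 - (if cd.1 = ')' then (1 : Int) else 0) > 0)).map Prod.fst
    = cbpSpec l d := by
  induction l with
  | nil => intro d; simp [cbpPre, cbpSpec]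
  | cons c t ih =>
    intro d
    have harg : d + ((if c = '(' then (1:Int) else 0) - (if c = ')' then 1 else 0))
        = d - (if c = ')' then 1 else 0) + (if c = '(' then 1 else 0) := by ring
    simp only [cbpPre, cbpSpec, List.zip_cons_cons, List.filter_cons, harg]
    by_cases h : d - (if c = ')' then (1:Int) else 0) > 0
    · rw [if_pos (by exact decide_eq_true h), if_pos h, List.map_cons, ih]; rfl
    · rw [if_neg (by simpa using h), if_neg h, ih]; rfl

-- ===== VERDICT (by name: the statement is the Claim_ definition above) =====
theorem control_block_part_spec : Claim_equal_control_block_part := by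
  intro target _
  show control_block_part target = control_block_part_alt target
  simp only [control_block_part, control_block_part_alt, cbp_fold_a, cbp_fold_b,
    List.nil_append]
  rw [cbp_filter]
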